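-- pv_equiv track=rewrite | github.com/bembone/Projects | Python/ExJobbProject/PasswordCreation.py | RestoreEnd
-- ===== SOURCE A (Python) =====
-- def RestoreEnd(password):
--     nums=""
--     for i in reversed(range(len(password))):
--         if password[i].isnumeric() or not password[i].isalnum():
--             nums += password[i]
--         else:
--             break
--     return nums[::-1]
-- ===== SOURCE B (Python) =====
-- def RestoreEnd(password):
--     cut = 0
--     for i, ch in enumerate(password):
--         if ch.isalnum() and not ch.isnumeric():
--             cut = i + 1
--     return password[cut:]
-- ===== Notes on version B (the rewrite author's own statement) =====
-- stated objective: simpler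
-- what changed: Single forward pass computing the index just past the last letter, then one slice, instead of accumulating a reversed suffix character-by-character and flipping it.
import Mathlib
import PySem

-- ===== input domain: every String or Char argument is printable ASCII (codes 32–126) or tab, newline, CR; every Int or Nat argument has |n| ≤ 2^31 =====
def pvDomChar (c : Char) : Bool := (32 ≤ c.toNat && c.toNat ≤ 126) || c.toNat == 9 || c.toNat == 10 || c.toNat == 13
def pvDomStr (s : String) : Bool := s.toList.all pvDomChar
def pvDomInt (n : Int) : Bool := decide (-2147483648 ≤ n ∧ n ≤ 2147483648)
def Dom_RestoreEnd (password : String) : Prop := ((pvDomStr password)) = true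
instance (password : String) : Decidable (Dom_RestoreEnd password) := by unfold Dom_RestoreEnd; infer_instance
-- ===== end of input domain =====

-- B changes the decomposition: one forward pass computing the index just past the
-- last letter, then a single slice, instead of A's reverse accumulation + flip.
-- (On the ASCII domain, Python's str.isnumeric coincides with isdigit; the ports use PySem.Chars.isdigit there.)

-- ===== PORT A =====
-- the loop body: iterate the characters in reverse order (for i in reversed(range(len(password)))),
-- appending to nums until a char with (isalnum and not isnumeric) breaks the loop
def RestoreEndGo (rev : List Char) (nums : List Char) : List Char :=
  match rev with
  | [] => nums
  | c :: rest =>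
    if PySem.Chars.isdigit c || !(PySem.Chars.isalnum c) then RestoreEndGo rest (nums ++ [c])
    else nums

def RestoreEnd (password : String) : String :=
  String.ofList ((RestoreEndGo password.toList.reverse []).reverse)   -- return nums[::-1]

-- ===== PORT B =====
def RestoreEnd_alt (password : String) : String :=
  let cs := password.toList
  let cut : Int := (PySem.List.enumerate cs).foldl
    (fun cut p => if PySem.Chars.isalnum p.2 && !(PySem.Chars.isdigit p.2) then p.1 + 1 else cut) 0
  String.ofList (PySem.List.slice cs (some cut) none)   -- return password[cut:]

-- ===== PRECONDITION & SPEC =====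
def Spec_RestoreEnd (password : String) (out : String) : Prop := out = RestoreEnd_alt password
instance (password : String) (out : String) : Decidable (Spec_RestoreEnd password out) := by unfold Spec_RestoreEnd; infer_instance

-- ===== CLAIM (what is proved, stated in full; the proofs are below) =====
def Claim_equal_RestoreEnd : Prop := ∀ (password : String), Dom_RestoreEnd password → Spec_RestoreEnd password (RestoreEnd password)

-- ===== LEMMAS AND PROOFS =====

def pvPred (c : Char) : Bool := PySem.Chars.isdigit c || !(PySem.Chars.isalnum c)

theorem restoreEndGo_eq (rev nums : List Char) :
    RestoreEndGo rev nums = nums ++ rev.takeWhile pvPred := by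
  induction rev generalizing nums with
  | nil => simp [RestoreEndGo]
  | cons c rest ih =>
    by_cases h : pvPred c = true
    · simp [RestoreEndGo, pvPred] at h ⊢
      rcases h with h | h <;> simp [h, ih, pvPred]
    · simp [pvPred] at h
      simp [RestoreEndGo, h, pvPred]

theorem takeWhile_len_le (cs : List Char) :
    (cs.reverse.takeWhile pvPred).length ≤ cs.length := by
  calc (cs.reverse.takeWhile pvPred).length ≤ cs.reverse.length :=
        (List.takeWhile_prefix _).length_le
    _ = cs.length := by simp

theorem cut_eq (cs : List Char) :
    (PySem.List.enumerate cs).foldl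
      (fun cut p => if PySem.Chars.isalnum p.2 && !(PySem.Chars.isdigit p.2) then p.1 + 1 else cut) 0
    = ((cs.length : Int) - (cs.reverse.takeWhile pvPred).length) := by
  induction cs using List.reverseRecOn with
  | nil => simp [PySem.List.enumerate]
  | append_singleton cs c ih =>
    rw [PySem.List.enumerate_append, List.foldl_append, ih]
    have hlen := takeWhile_len_le cs
    cases hd : PySem.Chars.isdigit c <;> cases ha : PySem.Chars.isalnum c <;>
      simp [PySem.List.enumerate, pvPred, hd, ha]

theorem drop_suffix {α : Type} (a b cs : List α) (h : cs = a ++ b) :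
    cs.drop (cs.length - b.length) = b := by
  subst h
  simp

theorem split_rev (cs : List Char) :
    cs = (cs.reverse.dropWhile pvPred).reverse ++ (cs.reverse.takeWhile pvPred).reverse := by
  calc cs = cs.reverse.reverse := by simp
    _ = (cs.reverse.takeWhile pvPred ++ cs.reverse.dropWhile pvPred).reverse := by
        rw [List.takeWhile_append_dropWhile]
    _ = _ := List.reverse_append

-- ===== VERDICT (by name: the statement is the Claim_ definition above) =====
theorem RestoreEnd_spec : Claim_equal_RestoreEnd := by
  intro password _
  unfold Spec_RestoreEnd RestoreEnd RestoreEnd_alt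
  dsimp only
  rw [restoreEndGo_eq, cut_eq]
  set cs := password.toList with hcs
  have hlen := takeWhile_len_le cs
  have hcast : ((cs.length : Int) - (cs.reverse.takeWhile pvPred).length)
      = ((cs.length - (cs.reverse.takeWhile pvPred).length : Nat) : Int) := by
    omega
  have hd := drop_suffix _ _ _ (split_rev cs)
  rw [List.length_reverse] at hd
  rw [hcast, PySem.List.slice_from_natCast, hd]
  simp
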